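-- pv_equiv track=rewrite | github.com/zensgit/CADGameFusion | tools/read_editor_assembly_roundtrip_metrics.py | normalize_count_map
-- ===== SOURCE A (Python) =====
-- def as_int(value) -> int:
--     try:
--         return int(value or 0)
--     except Exception:
--         return 0
--
-- def normalize_count_map(value) -> dict[str, int]:
--     if not isinstance(value, dict):
--         return {}
--     out: dict[str, int] = {}
--     for raw_key, raw_value in value.items():
--         key = str(raw_key or "").strip()
--         if not key:
--             continue
--         count = as_int(raw_value)
--         if count <= 0:
--             continue
--         out[key] = out.get(key, 0) + count
--     return dict(sorted(out.items()))
-- ===== SOURCE B (Python) =====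
-- def as_int(value) -> int:
--     try:
--         return int(value or 0)
--     except Exception:
--         return 0
--
-- def normalize_count_map(value) -> dict[str, int]:
--     if not isinstance(value, dict):
--         return {}
--     cleaned = [(str(k or "").strip(), as_int(v)) for k, v in value.items()]
--     pairs = sorted((k, c) for k, c in cleaned if k and c > 0)
--     out: dict[str, int] = {}
--     i = 0
--     n = len(pairs)
--     while i < n:
--         key = pairs[i][0]
--         total = 0
--         while i < n and pairs[i][0] == key:
--             total += pairs[i][1]
--             i += 1
--         out[key] = total
--     return out
-- ===== Notes on version B (the rewrite author's own statement) =====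
-- stated objective: alternative
-- what changed: Replaces A's mutable dict accumulator followed by a sort of its items with a clean/filter pass, one sort of the cleaned pairs, and a linear walk that sums each run of equal keys.
import Mathlib
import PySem

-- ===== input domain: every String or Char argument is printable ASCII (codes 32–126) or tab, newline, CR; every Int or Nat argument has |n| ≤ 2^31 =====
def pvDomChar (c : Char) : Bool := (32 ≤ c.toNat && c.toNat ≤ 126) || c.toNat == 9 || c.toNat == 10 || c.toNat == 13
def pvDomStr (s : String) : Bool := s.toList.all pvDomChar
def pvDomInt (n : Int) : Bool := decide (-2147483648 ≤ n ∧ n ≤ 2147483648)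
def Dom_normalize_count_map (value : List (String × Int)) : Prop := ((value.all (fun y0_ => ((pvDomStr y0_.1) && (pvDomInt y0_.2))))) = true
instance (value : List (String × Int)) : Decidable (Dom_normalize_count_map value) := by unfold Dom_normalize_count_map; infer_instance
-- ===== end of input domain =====

-- B replaces A's mutable dict accumulator followed by a sort of its items with a
-- clean/filter pass, one sort of the cleaned pairs, and a linear walk over runs of equal keys.

-- ===== PORT A =====
-- as_int: int(value or 0) on an int argument — 0 stays 0, anything else is itself
def as_int (v : Int) : Int := if v = 0 then 0 else v

-- the isinstance(value, dict) guard is always true under the type convention and is omitted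
def normalize_count_map (value : List (String × Int)) : List (String × Int) :=
  let out := value.foldl (fun (out : PySem.Dict String Int) p =>
    let key := PySem.Str.strip (if p.1 = "" then "" else p.1)   -- str(raw_key or "").strip()
    if key = "" then out
    else
      let count := as_int p.2
      if count ≤ 0 then out
      else out.insert key (out.getD key 0 + count)) PySem.Dict.empty
  PySem.List.sorted2 out.items (fun q => q.1) (fun q => q.2) false   -- dict(sorted(out.items()))

-- ===== PORT B =====
-- the nested while loops of B: one output pair per run of equal keys of the sorted list
def pvGroup : List (String × Int) → List (String × Int)
  | [] => []
  | p :: rest =>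
      (p.1, p.2 + ((rest.takeWhile (fun q => q.1 == p.1)).map (fun q => q.2)).sum)
        :: pvGroup (rest.dropWhile (fun q => q.1 == p.1))
  termination_by l => l.length
  decreasing_by
    simp only [List.length_cons]
    exact Nat.lt_succ_of_le (List.length_dropWhile_le _ _)

def normalize_count_map_alt (value : List (String × Int)) : List (String × Int) :=
  let cleaned := value.map (fun p => (PySem.Str.strip (if p.1 = "" then "" else p.1), as_int p.2))
  let pairs := PySem.List.sorted2 (cleaned.filter (fun p => decide (p.1 ≠ "") && decide (0 < p.2)))
    (fun q => q.1) (fun q => q.2) false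
  pvGroup pairs

-- ===== PRECONDITION & SPEC =====
def Spec_normalize_count_map (value : List (String × Int)) (out : List (String × Int)) : Prop := out = normalize_count_map_alt value
instance (value : List (String × Int)) (out : List (String × Int)) : Decidable (Spec_normalize_count_map value out) := by unfold Spec_normalize_count_map; infer_instance

-- ===== CLAIM (what is proved, stated in full; the proofs are below) =====
def Claim_equal_normalize_count_map : Prop := ∀ (value : List (String × Int)), Dom_normalize_count_map value → Spec_normalize_count_map value (normalize_count_map value)

-- ===== LEMMAS AND PROOFS =====

-- the tuple comparison sorted2 uses (reverse = false)
def pvLexLt (a b : String × Int) : Bool :=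
  decide (a.1 < b.1) || (!decide (b.1 < a.1) && decide (a.2 < b.2))

theorem sorted2_eq_foldl (xs : List (String × Int)) :
    PySem.List.sorted2 xs (fun q => q.1) (fun q => q.2) false
      = xs.foldl (fun acc x => PySem.List.insertBy pvLexLt x acc) [] := rfl

theorem insertBy_middle {α : Type} (before : α → α → Bool) (x : α) (l₁ l₂ : List α)
    (h2 : ∀ b, l₂.head? = some b → before x b = true)
    (h1 : ∀ a ∈ l₁, before x a = false) :
    PySem.List.insertBy before x (l₁ ++ l₂) = l₁ ++ x :: l₂ := by
  revert h1
  induction l₁ with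
  | nil =>
    intro _
    cases l₂ with
    | nil => rfl
    | cons b t => simp [PySem.List.insertBy, h2 b rfl]
  | cons a l₁ ih =>
    intro h1
    simp [PySem.List.insertBy, h1 a (by simp)]
    exact ih (fun a ha => h1 a (by simp [ha]))

theorem sorted2_eq_of_perm_of_pairwise_fst_lt (xs ys : List (String × Int))
    (hp : ys.Perm xs) (hs : ys.Pairwise (fun a b => a.1 < b.1)) :
    PySem.List.sorted2 xs (fun q => q.1) (fun q => q.2) false = ys := by
  induction xs using List.reverseRecOn generalizing ys with
  | nil => simp [sorted2_eq_foldl, hp.eq_nil]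
  | append_singleton xs x ih =>
    have hx : x ∈ ys := hp.mem_iff.mpr (by simp)
    obtain ⟨l₁, l₂, rfl⟩ := List.append_of_mem hx
    have hperm : (l₁ ++ l₂).Perm xs := by
      have h1 : (l₁ ++ x :: l₂).Perm (x :: (l₁ ++ l₂)) := List.perm_middle
      have h2 : (xs ++ [x]).Perm (x :: xs) := List.perm_append_singleton x xs
      exact (h1.symm.trans (hp.trans h2)).cons_inv
    have hpw : (l₁ ++ l₂).Pairwise (fun a b => a.1 < b.1) :=
      hs.sublist (List.Sublist.append_left (List.sublist_cons_self x l₂) l₁)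
    rw [sorted2_eq_foldl, List.foldl_append, ← sorted2_eq_foldl, ih _ hperm hpw]
    rw [List.pairwise_append] at hs
    apply insertBy_middle
    · intro b hb
      have hbmem : b ∈ l₂ := by
        cases l₂ with
        | nil => simp at hb
        | cons c t => simp at hb; simp [hb]
      have : x.1 < b.1 := (List.pairwise_cons.mp hs.2.1).1 b hbmem
      simp [pvLexLt, this]
    · intro a ha
      have : a.1 < x.1 := hs.2.2 a ha x (by simp)
      simp [pvLexLt, this, asymm this]

theorem insertBy_pairwise_fst_le (x : String × Int) (ys : List (String × Int))
    (h : ys.Pairwise (fun a b => a.1 ≤ b.1)) :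
    (PySem.List.insertBy pvLexLt x ys).Pairwise (fun a b => a.1 ≤ b.1) := by
  induction ys with
  | nil => simp [PySem.List.insertBy]
  | cons y ys ih =>
    rw [List.pairwise_cons] at h
    by_cases hx : pvLexLt x y = true
    · have hxy : x.1 ≤ y.1 := by
        simp [pvLexLt] at hx
        rcases hx with h' | h'
        · exact le_of_lt (String.lt_iff_toList_lt.mpr h')
        · exact String.le_iff_toList_le.mpr h'.1
      simp only [PySem.List.insertBy]
      rw [if_pos hx]
      refine List.pairwise_cons.mpr ⟨?_, List.pairwise_cons.mpr ⟨h.1, h.2⟩⟩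
      intro b hb
      rcases List.mem_cons.mp hb with rfl | hb'
      · exact hxy
      · exact le_trans hxy (h.1 b hb')
    · have hyx : y.1 ≤ x.1 := by
        simp [pvLexLt] at hx
        exact String.le_iff_toList_le.mpr hx.1
      simp only [PySem.List.insertBy]
      rw [if_neg hx]
      refine List.pairwise_cons.mpr ⟨?_, ih h.2⟩
      intro b hb
      rcases (PySem.List.insertBy_mem_iff pvLexLt x b ys).mp hb with rfl | hb'
      · exact hyx
      · exact h.1 b hb'

theorem sorted2_pairwise_fst_le (xs : List (String × Int)) :
    (PySem.List.sorted2 xs (fun q => q.1) (fun q => q.2) false).Pairwise (fun a b => a.1 ≤ b.1) := by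
  rw [sorted2_eq_foldl]
  have : ∀ (acc : List (String × Int)), acc.Pairwise (fun a b => a.1 ≤ b.1) →
      (xs.foldl (fun acc x => PySem.List.insertBy pvLexLt x acc) acc).Pairwise (fun a b => a.1 ≤ b.1) := by
    induction xs with
    | nil => intro acc h; simpa using h
    | cons x xs ih =>
      intro acc h
      exact ih _ (insertBy_pairwise_fst_le x acc h)
  exact this [] (by simp)

theorem ofList_sublist {α : Type} [BEq α] [LawfulBEq α] (l : List α) : (PySem.Set.ofList l).Sublist l := by
  induction l with
  | nil => simp [PySem.Set.ofList, PySem.Set.empty]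
  | cons x l ih =>
    rw [PySem.Set.ofList_cons]
    have h1 : ((PySem.Set.ofList l).discard x).Sublist (PySem.Set.ofList l) := by
      simp only [PySem.Set.discard]
      exact List.filter_sublist
    exact List.Sublist.cons₂ x (h1.trans ih)

theorem dedup_pairwise_lt (l : List String) (h : l.Pairwise (· ≤ ·)) :
    (PySem.List.dedup l).Pairwise (· < ·) := by
  have hsub : (PySem.List.dedup l).Sublist l := by
    simpa using ofList_sublist l
  have hle : (PySem.List.dedup l).Pairwise (· ≤ ·) := h.sublist hsub
  have hne : (PySem.List.dedup l).Pairwise (· ≠ ·) := PySem.List.nodup_dedup l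
  exact (hle.and hne).imp (fun h => lt_of_le_of_ne h.1 h.2)

theorem filter_ofList {α : Type} [BEq α] [LawfulBEq α] (q : α → Bool) (l : List α) :
    (PySem.Set.ofList l).filter q = PySem.Set.ofList (l.filter q) := by
  induction l with
  | nil => rfl
  | cons x l ih =>
    by_cases hq : q x = true
    · rw [PySem.Set.ofList_cons, List.filter_cons_of_pos hq,
        List.filter_cons_of_pos hq, PySem.Set.ofList_cons]
      simp only [PySem.Set.discard]
      rw [List.filter_comm, ih]
    · rw [PySem.Set.ofList_cons, List.filter_cons_of_neg hq, List.filter_cons_of_neg hq]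
      simp only [PySem.Set.discard]
      rw [List.filter_comm, ih]
      apply List.filter_eq_self.mpr
      intro a ha
      have hmem : a ∈ l.filter q := by simpa using (PySem.Set.mem_ofList (l.filter q) a).mp ha
      have hqa : q a = true := (List.mem_filter.mp hmem).2
      have : a ≠ x := fun hax => hq (hax ▸ hqa)
      simpa using this

-- characterization of the run-walk on a key-sorted list
theorem pvGroup_sorted (S : List (String × Int)) (hS : S.Pairwise (fun a b => a.1 ≤ b.1)) :
    pvGroup S = (PySem.List.dedup (S.map (fun q => q.1))).map
      (fun k => (k, ((S.filter (fun q => q.1 == k)).map (fun q => q.2)).sum)) := by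
  induction S using pvGroup.induct with
  | case1 => simp [pvGroup]
  | case2 p rest ih =>
    rw [List.pairwise_cons] at hS
    set t := rest.takeWhile (fun q => q.1 == p.1) with ht
    set d := rest.dropWhile (fun q => q.1 == p.1) with hd
    have htd : t ++ d = rest := List.takeWhile_append_dropWhile
    have htkey : ∀ q ∈ t, q.1 = p.1 := by
      intro q hq
      simpa using List.mem_takeWhile_imp hq
    have hdpair : d.Pairwise (fun a b => a.1 ≤ b.1) :=
      hS.2.sublist (List.dropWhile_sublist _)
    have hdkey : ∀ q ∈ d, p.1 < q.1 := by
      intro q hq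
      have hdnil : d ≠ [] := by
        intro h; rw [h] at hq; simp at hq
      obtain ⟨d0, d', hdc⟩ := List.exists_cons_of_ne_nil hdnil
      have hdrop : rest.dropWhile (fun q => q.1 == p.1) = d0 :: d' := hd.symm.trans hdc
      have hnil : rest.dropWhile (fun q => q.1 == p.1) ≠ [] := by rw [hdrop]; simp
      have hne : (d0.1 == p.1) = false := by
        have hhead := List.head_dropWhile_not (fun q : String × Int => q.1 == p.1) hnil
        have hh : (rest.dropWhile (fun q => q.1 == p.1)).head hnil = d0 := by
          simp [hdrop]
        rwa [hh] at hhead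
      have hd0mem : d0 ∈ rest := (List.dropWhile_sublist _).subset (by rw [← hd, hdc]; simp)
      have hd0 : p.1 < d0.1 := by
        refine lt_of_le_of_ne (hS.1 d0 hd0mem) ?_
        intro h
        simp [← h] at hne
      rw [hdc] at hq
      rcases List.mem_cons.mp hq with rfl | hq'
      · exact hd0
      · have hle : d0.1 ≤ q.1 := by
          have hp := hdpair
          rw [hdc, List.pairwise_cons] at hp
          exact hp.1 q hq'
        exact lt_of_lt_of_le hd0 hle
    have h1 : (t.map (fun q => q.1)).filter (fun y => !(y == p.1)) = [] := by
      apply List.filter_eq_nil_iff.mpr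
      intro y hy
      obtain ⟨q, hq, rfl⟩ := List.mem_map.mp hy
      simp [htkey q hq]
    have h2 : (d.map (fun q => q.1)).filter (fun y => !(y == p.1)) = d.map (fun q => q.1) := by
      apply List.filter_eq_self.mpr
      intro y hy
      obtain ⟨q, hq, rfl⟩ := List.mem_map.mp hy
      simpa using (ne_of_gt (hdkey q hq))
    have hmapfst : (p :: rest).map (fun q => q.1) = p.1 :: (t.map (fun q => q.1) ++ d.map (fun q => q.1)) := by
      rw [← htd]; simp
    have hdedup : PySem.List.dedup ((p :: rest).map (fun q => q.1))
        = p.1 :: PySem.List.dedup (d.map (fun q => q.1)) := by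
      simp only [PySem.List.dedup_eq_ofList, hmapfst]
      rw [PySem.Set.ofList_cons]
      simp only [PySem.Set.discard]
      rw [filter_ofList, List.filter_append, h1, h2, List.nil_append]
    have hfiltS : (p :: rest).filter (fun q => q.1 == p.1) = p :: t := by
      rw [List.filter_cons_of_pos (by simp), ← htd, List.filter_append,
        List.filter_eq_self.mpr (fun q hq => by simp [htkey q hq]),
        List.filter_eq_nil_iff.mpr (fun q hq => by simpa using (ne_of_gt (hdkey q hq))),
        List.append_nil]
    rw [pvGroup, hdedup, List.map_cons, hfiltS, ih hdpair]
    refine List.cons_eq_cons.mpr ⟨by simp [← ht], ?_⟩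
    apply List.map_congr_left
    intro k hk
    have hkmem : k ∈ d.map (fun q => q.1) := (PySem.List.mem_dedup _ _).mp hk
    obtain ⟨q0, hq0, rfl⟩ := List.mem_map.mp hkmem
    have hplt : p.1 < q0.1 := hdkey q0 hq0
    have hfilt2 : (p :: rest).filter (fun q => q.1 == q0.1) = d.filter (fun q => q.1 == q0.1) := by
      rw [List.filter_cons_of_neg (by simpa using (ne_of_lt hplt)), ← htd, List.filter_append,
        List.filter_eq_nil_iff.mpr (fun q hq => by simp [htkey q hq]; exact ne_of_lt hplt),
        List.nil_append]
    rw [hfilt2]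

-- the simple aggregation step A's loop reduces to on the cleaned, filtered pairs
def pvStep (d : PySem.Dict String Int) (p : String × Int) : PySem.Dict String Int :=
  d.insert p.1 (d.getD p.1 0 + p.2)

theorem foldA_eq_foldStep (l : List (String × Int)) (d : PySem.Dict String Int) :
    l.foldl (fun (out : PySem.Dict String Int) p =>
      let key := PySem.Str.strip (if p.1 = "" then "" else p.1)
      if key = "" then out
      else
        let count := as_int p.2
        if count ≤ 0 then out
        else out.insert key (out.getD key 0 + count)) d
      = ((l.map (fun p => (PySem.Str.strip (if p.1 = "" then "" else p.1), as_int p.2))).filter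
          (fun p => decide (p.1 ≠ "") && decide (0 < p.2))).foldl pvStep d := by
  induction l generalizing d with
  | nil => rfl
  | cons p l ih =>
    simp only [List.foldl_cons, List.map_cons, List.filter_cons]
    by_cases hk : PySem.Str.strip (if p.1 = "" then "" else p.1) = ""
    · simp [hk, ih]
    · by_cases hc : as_int p.2 ≤ 0
      · have : ¬ (0 : Int) < as_int p.2 := by omega
        simp [hk, hc, this, ih]
      · have : (0 : Int) < as_int p.2 := by omega
        simp [hk, hc, this, ih, pvStep]

theorem getD_foldl_pvStep (l : List (String × Int)) (d : PySem.Dict String Int) (k : String) :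
    (l.foldl pvStep d).getD k 0
      = d.getD k 0 + ((l.filter (fun p => p.1 == k)).map (fun p => p.2)).sum := by
  induction l generalizing d with
  | nil => simp
  | cons p l ih =>
    simp only [List.foldl_cons, List.filter_cons]
    by_cases h : p.1 = k
    · subst h
      simp [ih, pvStep]
      ring
    · have hne : ¬ (p.1 == k) = true := by simpa using h
      have hne' : k ≠ p.1 := fun hkp => h hkp.symm
      simp [ih, pvStep, PySem.Dict.getD_insert, hne, hne']

theorem normalize_count_map_spec' (value : List (String × Int)) :
    normalize_count_map value = normalize_count_map_alt value := by
  unfold normalize_count_map normalize_count_map_alt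
  rw [foldA_eq_foldStep]
  set pairs := ((value.map (fun p => (PySem.Str.strip (if p.1 = "" then "" else p.1), as_int p.2))).filter
      (fun p => decide (p.1 ≠ "") && decide (0 < p.2))) with hpairs
  set d := pairs.foldl pvStep PySem.Dict.empty with hd
  set g : String → String × Int := fun k => (k, ((pairs.filter (fun p => p.1 == k)).map (fun p => p.2)).sum) with hg
  set keys := PySem.List.sorted (PySem.Set.ofList (pairs.map (fun p => p.1))) (fun k => k) false with hkeysort
  -- keys of the accumulated dict
  have hkeys : d.keys = PySem.Set.ofList (pairs.map (fun p => p.1)) := by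
    rw [hd]
    have := PySem.Dict.keys_foldl_insert_key (ν := Int) pairs (fun p => p.1)
      (fun d p => d.getD p.1 0 + p.2) PySem.Dict.empty
    simpa [pvStep, PySem.Set.update_nil_left] using this
  have hnodup : d.keys.Nodup := by
    rw [hkeys]; exact PySem.Set.nodup_ofList _
  have hitems : d.items = d.keys.map (fun k => (k, d.getD k 0)) :=
    PySem.Dict.items_eq_map_keys d hnodup 0
  have hgetD : ∀ k, d.getD k 0 = ((pairs.filter (fun p => p.1 == k)).map (fun p => p.2)).sum := by
    intro k; rw [hd, getD_foldl_pvStep]; simp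
  have hitems' : d.items = d.keys.map g := by
    rw [hitems]; exact List.map_congr_left (fun k _ => by simp [hg, hgetD k])
  have hkeylt : keys.Pairwise (fun a b => a < b) := PySem.List.sorted_ofList_pairwise_lt _
  -- A's side equals keys.map g
  have hA : PySem.List.sorted2 d.items (fun q => q.1) (fun q => q.2) false = keys.map g := by
    apply sorted2_eq_of_perm_of_pairwise_fst_lt
    · rw [hitems', hkeys]
      exact (PySem.List.sorted_perm _ _ _).map g
    · exact hkeylt.map g (fun a b h => by simpa [hg] using h)
  -- B's side equals keys.map g
  have hB : pvGroup (PySem.List.sorted2 pairs (fun q => q.1) (fun q => q.2) false) = keys.map g := by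
    set S := PySem.List.sorted2 pairs (fun q => q.1) (fun q => q.2) false with hSdef
    have hSperm : S.Perm pairs := PySem.List.sorted2_perm _ _ _ _
    have hSpair : S.Pairwise (fun a b => a.1 ≤ b.1) := sorted2_pairwise_fst_le pairs
    rw [pvGroup_sorted S hSpair]
    have hdedup : PySem.List.dedup (S.map (fun q => q.1)) = keys := by
      symm
      apply PySem.List.sorted_eq_of_perm_of_pairwise_lt
      · apply (List.perm_ext_iff_of_nodup (PySem.List.nodup_dedup _) (PySem.Set.nodup_ofList _)).mpr
        intro a
        rw [PySem.List.mem_dedup, PySem.Set.mem_ofList]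
        exact (hSperm.map (fun q => q.1)).mem_iff
      · exact dedup_pairwise_lt _ (List.pairwise_map.mpr hSpair)
    rw [hdedup]
    apply List.map_congr_left
    intro k _
    have : (S.filter (fun q => q.1 == k)).Perm (pairs.filter (fun q => q.1 == k)) :=
      hSperm.filter _
    simp [hg, (this.map (fun q => q.2)).sum_eq]
  rw [hA, hB]

-- ===== VERDICT (by name: the statement is the Claim_ definition above) =====
theorem normalize_count_map_spec : Claim_equal_normalize_count_map := by
  intro value _
  unfold Spec_normalize_count_map
  exact normalize_count_map_spec' value
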